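-- pv_equiv track=rewrite | github.com/stefano75-uks/gestione_educatori | confronto_nomi.py | genera_combinazioni_nome
-- ===== SOURCE A (Python) =====
-- def genera_combinazioni_nome(nome):
--     """
--     Genera tutte le possibili combinazioni cognome-nome
--     Per esempio: "AVAM_VALICAAVRAM_VALRICA" genererà:
--     [("AVAM", "VALICAAVRAM_VALRICA"),
--      ("AVAM_VALICAAVRAM", "VALRICA"),
--      ...]
--     """
--     parole = nome.split('_')
--     combinazioni = []
--
--     # Prova tutte le possibili divisioni
--     for i in range(1, len(parole)):
--         cognome = '_'.join(parole[:i])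
--         nome = '_'.join(parole[i:])
--         combinazioni.append((cognome, nome))
--
--     return combinazioni
-- ===== SOURCE B (Python) =====
-- def genera_combinazioni_nome(nome):
--     """Slice at each underscore position instead of splitting into words and re-joining."""
--     combinazioni = []
--     for p, ch in enumerate(nome):
--         if ch == '_':
--             combinazioni.append((nome[:p], nome[p + 1:]))
--     return combinazioni
-- ===== Notes on version B (the rewrite author's own statement) =====
-- stated objective: simpler
-- what changed: B scans the raw string once and, at each underscore position p, emits (nome[:p], nome[p+1:]) by direct slicing, instead of A's split into a word list followed by join-based reconstruction of prefix and suffix for every split index.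
import Mathlib
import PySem

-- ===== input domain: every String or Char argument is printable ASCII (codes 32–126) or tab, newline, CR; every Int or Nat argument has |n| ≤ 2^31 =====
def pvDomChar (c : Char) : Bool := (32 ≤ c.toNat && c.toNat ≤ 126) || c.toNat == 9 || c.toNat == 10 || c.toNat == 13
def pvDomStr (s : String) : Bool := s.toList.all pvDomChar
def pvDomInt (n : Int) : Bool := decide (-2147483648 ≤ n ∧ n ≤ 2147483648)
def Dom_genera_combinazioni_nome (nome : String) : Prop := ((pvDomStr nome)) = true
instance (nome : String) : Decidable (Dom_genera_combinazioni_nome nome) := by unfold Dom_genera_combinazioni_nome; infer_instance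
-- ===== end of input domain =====

-- B replaces A's split('_') + per-index '_'.join reconstruction by one scan over the raw
-- string that slices directly at each underscore position (objective: simpler).

-- ===== PORT A =====
def genera_combinazioni_nome (nome : String) : List (String × String) :=
  let parole : List String := (PySem.Chars.splitOn nome.toList "_".toList).map String.ofList
  (PySem.List.pyRange 1 (parole.length : Int) 1).foldl
    (fun combinazioni i =>
      let cognome := PySem.Str.join "_" (PySem.List.slice parole none (some i))
      let nome' := PySem.Str.join "_" (PySem.List.slice parole (some i) none)
      combinazioni ++ [(cognome, nome')]) []

-- ===== PORT B =====
def genera_combinazioni_nome_alt (nome : String) : List (String × String) :=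
  (PySem.List.enumerate nome.toList).foldl
    (fun combinazioni pc =>
      if pc.2 == '_' then
        combinazioni ++ [(PySem.Str.slice nome none (some pc.1),
                          PySem.Str.slice nome (some (pc.1 + 1)) none)]
      else combinazioni) []

-- ===== PRECONDITION & SPEC =====
def Spec_genera_combinazioni_nome (nome : String) (out : List (String × String)) : Prop := out = genera_combinazioni_nome_alt nome
instance (nome : String) (out : List (String × String)) : Decidable (Spec_genera_combinazioni_nome nome out) := by unfold Spec_genera_combinazioni_nome; infer_instance

-- ===== CLAIM (what is proved, stated in full; the proofs are below) =====
def Claim_equal_genera_combinazioni_nome : Prop := ∀ (nome : String), Dom_genera_combinazioni_nome nome → Spec_genera_combinazioni_nome nome (genera_combinazioni_nome nome)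

-- ===== LEMMAS AND PROOFS =====

-- the underscore positions of a char list, in order (shared reference point of both ports)
def uposN : List Char → List Nat
  | [] => []
  | c :: cs => (if c = '_' then [0] else []) ++ (uposN cs).map (· + 1)

-- PySem's fuel-based splitOn with the one-char separator '_' IS Mathlib's List.splitOn
theorem splitOn_go_eq (fuel : Nat) : ∀ (l cur : List Char) (accs : List (List Char)),
    l.length < fuel →
    PySem.Chars.splitOn.go ['_'] fuel l cur accs =
      accs.reverse ++ (l.splitOn '_').modifyHead (cur.reverse ++ ·) := by
  induction fuel with
  | zero => intro l cur accs h; omega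
  | succ f ih =>
    intro l cur accs h
    cases l with
    | nil => simp [PySem.Chars.splitOn.go, List.splitOn, List.splitOnP_nil]
    | cons c rest =>
      rw [PySem.Chars.splitOn.go]
      by_cases hc : c = '_'
      · subst hc
        simp only [List.isPrefixOf, beq_self_eq_true, Bool.true_and, if_true]
        rw [ih _ _ _ (by simpa using h)]
        simp [List.splitOn, List.splitOnP_cons]
        cases rest.splitOnP (· == '_') <;> simp
      · have hpre : List.isPrefixOf ['_'] (c :: rest) = false := by
          simp [List.isPrefixOf]; exact fun hh => hc hh.symm
        rw [hpre]
        simp only [if_false, Bool.false_eq_true]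
        rw [ih _ _ _ (by simpa using h)]
        simp only [List.splitOn, List.splitOnP_cons, beq_iff_eq, hc, if_false]
        cases rest.splitOnP (· == '_') <;> simp

theorem splitOn_eq (cs : List Char) :
    PySem.Chars.splitOn cs ['_'] = cs.splitOn '_' := by
  rw [show PySem.Chars.splitOn cs ['_'] =
      PySem.Chars.splitOn.go ['_'] (cs.length + 1) cs [] [] from rfl]
  rw [splitOn_go_eq _ _ _ _ (by omega)]
  cases cs.splitOn '_' <;> simp

theorem splitOn_cons (c : Char) (cs : List Char) :
    (c :: cs).splitOn '_' =
      if c = '_' then [] :: cs.splitOn '_' else (cs.splitOn '_').modifyHead (c :: ·) := by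
  simp only [List.splitOn, List.splitOnP_cons, beq_iff_eq]

theorem join_nil_cons (X : List (List Char)) (hX : X ≠ []) :
    PySem.Chars.join ['_'] ([] :: X) = '_' :: PySem.Chars.join ['_'] X := by
  cases X with
  | nil => exact absurd rfl hX
  | cons a l => rw [PySem.Chars.join_cons_cons]; simp

theorem join_cons_head (c : Char) (s0 : List Char) (X : List (List Char)) :
    PySem.Chars.join ['_'] ((c :: s0) :: X) = c :: PySem.Chars.join ['_'] (s0 :: X) := by
  cases X with
  | nil => rw [PySem.Chars.join_singleton, PySem.Chars.join_singleton]
  | cons a l => rw [PySem.Chars.join_cons_cons, PySem.Chars.join_cons_cons]; simp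

-- the B-side fold, over any enumerate start, visits exactly the underscore positions
theorem filt_enum (cs : List Char) : ∀ (s : Nat),
    ((PySem.List.enumerate cs (s : Int)).filter (fun pc => pc.2 == '_')).map (fun pc => pc.1)
      = (uposN cs).map (fun k => ((s + k : Nat) : Int)) := by
  induction cs with
  | nil => intro s; simp [PySem.List.enumerate_nil, uposN]
  | cons c cs ih =>
    intro s
    rw [PySem.List.enumerate_cons]
    have h1 : ((s : Int) + 1) = ((s + 1 : Nat) : Int) := by push_cast; ring
    rw [h1]
    by_cases hc : c = '_'
    · subst hc
      simp only [uposN, List.filter_cons, beq_self_eq_true, if_true, List.map_cons, ih,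
        List.map_map, List.cons_append, List.nil_append]
      refine List.cons_eq_cons.mpr ⟨by simp, ?_⟩
      apply List.map_congr_left
      intro k _; simp [Function.comp]; push_cast; ring
    · simp only [uposN, List.filter_cons, List.map_map, ih, List.nil_append,
        beq_iff_eq, hc, if_false]
      apply List.map_congr_left
      intro k _; simp [Function.comp]; push_cast; ring

-- main characterization: A's range-over-splits map equals the underscore-position map
theorem main_char (cs : List Char) :
    (List.range ((cs.splitOn '_').length - 1)).map
        (fun k => (PySem.Chars.join ['_'] ((cs.splitOn '_').take (1 + k)),
                   PySem.Chars.join ['_'] ((cs.splitOn '_').drop (1 + k))))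
      = (uposN cs).map (fun k => (cs.take k, cs.drop (k + 1))) := by
  induction cs with
  | nil => simp [List.splitOn, List.splitOnP_nil, uposN]
  | cons c cs ih =>
    rw [splitOn_cons]
    obtain ⟨s0, S, hS⟩ : ∃ s0 S, cs.splitOn '_' = s0 :: S :=
      List.exists_cons_of_ne_nil (List.splitOnP_ne_nil _ _)
    by_cases hc : c = '_'
    · subst hc
      rw [if_pos rfl]
      simp only [uposN]
      rw [List.length_cons, Nat.add_sub_cancel]
      rw [show (cs.splitOn '_').length = ((cs.splitOn '_').length - 1) + 1 by rw [hS]; simp]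
      rw [List.range_succ_eq_map]
      simp only [List.map_cons, List.map_map]
      refine List.cons_eq_cons.mpr ⟨?_, ?_⟩
      · refine Prod.ext ?_ ?_
        · simp [PySem.Chars.join_singleton]
        · simp only [List.drop_succ_cons, List.drop_zero]
          have := List.intercalate_splitOn cs '_'
          simpa [PySem.Chars.join] using this
      · calc (List.range ((cs.splitOn '_').length - 1)).map
              ((fun k => (PySem.Chars.join ['_'] (List.take (1 + k) ([] :: cs.splitOn '_')),
                          PySem.Chars.join ['_'] (List.drop (1 + k) ([] :: cs.splitOn '_')))) ∘ Nat.succ)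
            = (List.range ((cs.splitOn '_').length - 1)).map
              ((fun p => ('_' :: p.1, p.2)) ∘ (fun k => (PySem.Chars.join ['_'] ((cs.splitOn '_').take (1 + k)),
                          PySem.Chars.join ['_'] ((cs.splitOn '_').drop (1 + k))))) := by
              apply List.map_congr_left
              intro k _
              simp only [Function.comp, Nat.succ_eq_add_one]
              rw [show 1 + (k + 1) = (1 + k) + 1 by ring, List.take_succ_cons, List.drop_succ_cons]
              rw [join_nil_cons _ (by simp [hS])]
          _ = ((uposN cs).map (fun k => (cs.take k, cs.drop (k + 1)))).map (fun p => ('_' :: p.1, p.2)) := by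
              rw [← List.map_map, ih, List.map_map]
          _ = ((uposN cs).map (fun x => x + 1)).map (fun k => (List.take k ('_' :: cs), List.drop (k + 1) ('_' :: cs))) := by
              simp only [List.map_map]
              apply List.map_congr_left
              intro k _
              simp [Function.comp]
    · rw [if_neg hc]
      rw [hS] at ih ⊢
      rw [List.modifyHead_cons]
      simp only [uposN, if_neg hc, List.nil_append, List.length_cons] at ih ⊢
      rw [Nat.add_sub_cancel] at ih ⊢
      calc (List.range (S.length + 1 - 1)).map
              (fun k => (PySem.Chars.join ['_'] (List.take (1 + k) ((c :: s0) :: S)),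
                         PySem.Chars.join ['_'] (List.drop (1 + k) ((c :: s0) :: S))))
          = (List.range (S.length + 1 - 1)).map
              ((fun p => (c :: p.1, p.2)) ∘ (fun k => (PySem.Chars.join ['_'] (List.take (1 + k) (s0 :: S)),
                         PySem.Chars.join ['_'] (List.drop (1 + k) (s0 :: S))))) := by
            apply List.map_congr_left
            intro k _
            simp only [Function.comp]
            rw [show 1 + k = k + 1 by ring, List.take_succ_cons, List.take_succ_cons,
              List.drop_succ_cons, List.drop_succ_cons, join_cons_head]
        _ = ((uposN cs).map (fun k => (cs.take k, cs.drop (k + 1)))).map (fun p => (c :: p.1, p.2)) := by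
            rw [← List.map_map, Nat.add_sub_cancel, ih, List.map_map]
        _ = ((uposN cs).map (fun x => x + 1)).map (fun k => (List.take k (c :: cs), List.drop (k + 1) (c :: cs))) := by
            simp only [List.map_map]
            apply List.map_congr_left
            intro k _
            simp [Function.comp]

theorem A_char (nome : String) :
    genera_combinazioni_nome nome
      = (uposN nome.toList).map
          (fun k => (String.ofList (nome.toList.take k), String.ofList (nome.toList.drop (k + 1)))) := by
  unfold genera_combinazioni_nome
  rw [show "_".toList = ['_'] from rfl, splitOn_eq]
  rw [PySem.List.foldl_append_singleton_eq_map, List.nil_append]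
  rw [PySem.List.pyRange_one, List.map_map]
  rw [List.length_map]
  have hn : ((((nome.toList.splitOn '_').length : Int)) - 1).toNat = (nome.toList.splitOn '_').length - 1 := by omega
  rw [hn]
  calc (List.range ((nome.toList.splitOn '_').length - 1)).map
        ((fun i => (PySem.Str.join "_" (PySem.List.slice ((nome.toList.splitOn '_').map String.ofList) none (some i)),
                    PySem.Str.join "_" (PySem.List.slice ((nome.toList.splitOn '_').map String.ofList) (some i) none))) ∘
          (fun k : Nat => (1 : Int) + (k : Int)))
      = (List.range ((nome.toList.splitOn '_').length - 1)).map
        ((fun p : List Char × List Char => (String.ofList p.1, String.ofList p.2)) ∘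
          (fun k => (PySem.Chars.join ['_'] ((nome.toList.splitOn '_').take (1 + k)),
                     PySem.Chars.join ['_'] ((nome.toList.splitOn '_').drop (1 + k))))) := by
        apply List.map_congr_left
        intro k _
        simp only [Function.comp]
        have h1 : (1 : Int) + (k : Int) = ((1 + k : Nat) : Int) := by push_cast; ring
        rw [h1, PySem.List.slice_to_natCast, PySem.List.slice_from_natCast,
          ← List.map_take, ← List.map_drop]
        refine Prod.ext ?_ ?_ <;> simp [PySem.Str.join, PySem.Chars.join, Function.comp_def, String.toList_ofList]
    _ = ((uposN nome.toList).map (fun k => (nome.toList.take k, nome.toList.drop (k + 1)))).map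
          (fun p : List Char × List Char => (String.ofList p.1, String.ofList p.2)) := by
        rw [← List.map_map, main_char, List.map_map]
    _ = (uposN nome.toList).map
          (fun k => (String.ofList (nome.toList.take k), String.ofList (nome.toList.drop (k + 1)))) := by
        rw [List.map_map]; rfl

theorem B_char (nome : String) :
    genera_combinazioni_nome_alt nome
      = (uposN nome.toList).map
          (fun k => (String.ofList (nome.toList.take k), String.ofList (nome.toList.drop (k + 1)))) := by
  unfold genera_combinazioni_nome_alt
  rw [PySem.List.foldl_append_if, List.nil_append]
  rw [show (fun pc : Int × Char => (PySem.Str.slice nome none (some pc.1),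
        PySem.Str.slice nome (some (pc.1 + 1)) none))
      = (fun i : Int => (PySem.Str.slice nome none (some i),
        PySem.Str.slice nome (some (i + 1)) none)) ∘ (fun pc => pc.1) from rfl]
  rw [← List.map_map]
  rw [show (0 : Int) = ((0 : Nat) : Int) from rfl, filt_enum, List.map_map]
  apply List.map_congr_left
  intro k _
  simp only [Function.comp, Nat.zero_add]
  have h1 : ((k : Int)) + 1 = (((k + 1 : Nat)) : Int) := by push_cast; ring
  simp only [PySem.Str.slice, PySem.Chars.slice]
  rw [h1, PySem.List.slice_to_natCast, PySem.List.slice_from_natCast]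

-- ===== VERDICT (by name: the statement is the Claim_ definition above) =====
theorem genera_combinazioni_nome_spec : Claim_equal_genera_combinazioni_nome := by
  intro nome _
  unfold Spec_genera_combinazioni_nome
  rw [A_char, B_char]
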